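-- pv_equiv track=rewrite | github.com/udellgroup/gcimpute | GaussianCopulaImp/embody.py | _get_ord_in_obs
-- ===== SOURCE A (Python) =====
-- def _get_ord_in_obs(ord_indices, obs_indices):
--     indices = []
--     obs_index = 0
--     for i, (_ord,_obs) in enumerate(zip(ord_indices, obs_indices)):
--         # only process when enourtering an observed entry
--         if _obs:
--             # if the observed entry is ordinal, add the current obs_index as the relative order: ord_in_obs
--             if _ord:
--                 indices.append(obs_index)
--             obs_index += 1
--     return indices
-- ===== SOURCE B (Python) =====
-- def _get_ord_in_obs(ord_indices, obs_indices):
--     # Stage 1: prefix-count table: pref[i] = number of observed entries among positions 0..i.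
--     pref = []
--     c = 0
--     for b in obs_indices:
--         c += 1 if b else 0
--         pref.append(c)
--     # Stage 2: the rank of an observed position i among observed entries is pref[i] - 1.
--     return [p - 1 for o, b, p in zip(ord_indices, obs_indices, pref) if o and b]
-- ===== Notes on version B (the rewrite author's own statement) =====
-- stated objective: alternative
-- what changed: Replaces A's single loop that conditionally threads an obs_index counter and appends inline with a staged algorithm: first build a full prefix-count table of observed entries, then select entries whose rank is read off the table as pref[i]-1.
import Mathlib
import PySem

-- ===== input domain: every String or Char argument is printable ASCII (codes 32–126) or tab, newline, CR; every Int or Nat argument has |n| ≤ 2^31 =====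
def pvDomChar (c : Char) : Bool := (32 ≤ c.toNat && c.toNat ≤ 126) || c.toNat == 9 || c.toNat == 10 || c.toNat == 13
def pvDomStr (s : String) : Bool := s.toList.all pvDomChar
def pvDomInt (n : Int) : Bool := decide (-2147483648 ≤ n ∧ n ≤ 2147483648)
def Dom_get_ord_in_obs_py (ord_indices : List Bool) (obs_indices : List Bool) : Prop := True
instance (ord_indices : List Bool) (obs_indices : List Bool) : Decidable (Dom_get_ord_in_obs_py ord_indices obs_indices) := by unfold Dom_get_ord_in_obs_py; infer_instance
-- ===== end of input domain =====

-- B replaces A's counter-threading loop (conditional count + inline append) with a staged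
-- algorithm: build a full prefix-count table of observed entries, then read each rank off
-- the table as pref[i] - 1 (objective: alternative).

-- ===== PORT A =====
-- one loop over zip(ord, obs), threading (indices, obs_index)
def get_ord_in_obs_py (ord_indices : List Bool) (obs_indices : List Bool) : List Int :=
  ((ord_indices.zip obs_indices).foldl
    (fun (st : List Int × Int) p =>
      if p.2 then
        (if p.1 then st.1 ++ [st.2] else st.1, st.2 + 1)
      else st)
    ([], 0)).1

-- ===== PORT B =====
-- stage 1: prefix-count table of observed entries; stage 2: select with rank pref[i] - 1
def get_ord_in_obs_py_alt (ord_indices : List Bool) (obs_indices : List Bool) : List Int :=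
  let pref := (obs_indices.foldl
    (fun (st : List Int × Int) b =>
      let c := st.2 + (if b then 1 else 0)
      (st.1 ++ [c], c))
    ([], 0)).1
  (ord_indices.zip (obs_indices.zip pref)).filterMap
    (fun p => if p.1 && p.2.1 then some (p.2.2 - 1) else none)

-- ===== PRECONDITION & SPEC =====
def Spec_get_ord_in_obs_py (ord_indices : List Bool) (obs_indices : List Bool) (out : List Int) : Prop := out = get_ord_in_obs_py_alt ord_indices obs_indices
instance (ord_indices : List Bool) (obs_indices : List Bool) (out : List Int) : Decidable (Spec_get_ord_in_obs_py ord_indices obs_indices out) := by unfold Spec_get_ord_in_obs_py; infer_instance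

-- ===== CLAIM (what is proved, stated in full; the proofs are below) =====
def Claim_equal_get_ord_in_obs_py : Prop := ∀ (ord_indices : List Bool) (obs_indices : List Bool), Dom_get_ord_in_obs_py ord_indices obs_indices → Spec_get_ord_in_obs_py ord_indices obs_indices (get_ord_in_obs_py ord_indices obs_indices)

-- ===== LEMMAS AND PROOFS =====

-- common recursive characterisation: emitted ranks starting at k
def pvGo (ps : List (Bool × Bool)) (k : Int) : List Int :=
  match ps with
  | [] => []
  | (o, b) :: rest =>
    if b then (if o then k :: pvGo rest (k + 1) else pvGo rest (k + 1))
    else pvGo rest k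

-- the prefix-count table B builds, as a recursion starting at count c
def pvPref (bs : List Bool) (c : Int) : List Int :=
  match bs with
  | [] => []
  | b :: rest =>
    let c' := c + (if b then 1 else 0)
    c' :: pvPref rest c'

theorem pvA_fold (ps : List (Bool × Bool)) (acc : List Int) (k : Int) :
    (ps.foldl
      (fun (st : List Int × Int) p =>
        if p.2 then (if p.1 then st.1 ++ [st.2] else st.1, st.2 + 1) else st)
      (acc, k)).1 = acc ++ pvGo ps k := by
  induction ps generalizing acc k with
  | nil => simp [pvGo]
  | cons p rest ih =>
    obtain ⟨o, b⟩ := p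
    cases b <;> cases o <;> simp [pvGo, List.foldl, ih]

theorem pvB_pref_fold (bs : List Bool) (acc : List Int) (c : Int) :
    (bs.foldl
      (fun (st : List Int × Int) b =>
        (st.1 ++ [st.2 + (if b then 1 else 0)], st.2 + (if b then 1 else 0)))
      (acc, c)).1 = acc ++ pvPref bs c := by
  induction bs generalizing acc c with
  | nil => simp [pvPref]
  | cons b rest ih =>
    cases b <;> simp [pvPref, List.foldl, ih]

theorem pvB_select (os bs : List Bool) (c : Int) :
    (os.zip (bs.zip (pvPref bs c))).filterMap
      (fun p => if p.1 && p.2.1 then some (p.2.2 - 1) else none)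
      = pvGo (os.zip bs) c := by
  induction os generalizing bs c with
  | nil => simp [pvGo]
  | cons o os' ih =>
    cases bs with
    | nil => simp [pvGo]
    | cons b bs' =>
      cases b <;> cases o <;>
        simpa [pvPref, pvGo, add_sub_cancel_right] using ih bs' _

-- ===== VERDICT (by name: the statement is the Claim_ definition above) =====
theorem get_ord_in_obs_py_spec : Claim_equal_get_ord_in_obs_py := by
  intro ord_indices obs_indices _
  unfold Spec_get_ord_in_obs_py
  simp only [get_ord_in_obs_py, get_ord_in_obs_py_alt, pvA_fold, pvB_pref_fold, pvB_select,
    List.nil_append]
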